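-- pv_equiv track=rewrite | github.com/yashika-batra/python-practice | ArithmeticSequencePermutation.py | solve
-- ===== SOURCE A (Python) =====
-- def solve(nums):
--     # if nums has size 0 or 1, return True
--     if len(nums) == 0 or len(nums) == 1:
--         return True
--
--     # sort nums
--     nums.sort()
--     # initialize difference to the difference between
--     # the first two consecutive numbers in nums
--     difference = nums[1] - nums[0]
--
--     # for every other value in sorted nums
--     for i in range(2, len(nums)):
--         # if the difference between two consecutive numbers
--         # is not difference, return False
--         if nums[i] - nums[i - 1] != difference:
--             return False
--
--     # if we have not already returned False, every set of consecutive
--     # numbers in nums has the same difference, return True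
--     return True
-- ===== SOURCE B (Python) =====
-- def solve(nums):
--     n = len(nums)
--     if n <= 1:
--         return True
--     mn = min(nums)
--     mx = max(nums)
--     if mn == mx:
--         return True
--     if (mx - mn) % (n - 1) != 0:
--         return False
--     d = (mx - mn) // (n - 1)
--     seen = set(nums)
--     if len(seen) != n:
--         return False
--     return all(mn + i * d in seen for i in range(n))
-- ===== Notes on version B (the rewrite author's own statement) =====
-- stated objective: faster
-- what changed: B replaces A's sort-then-scan-consecutive-differences with an O(n) check: compute min/max, derive the required common difference from (max-min)/(n-1), and verify via a set that the values are exactly the n expected terms.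
import Mathlib
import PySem

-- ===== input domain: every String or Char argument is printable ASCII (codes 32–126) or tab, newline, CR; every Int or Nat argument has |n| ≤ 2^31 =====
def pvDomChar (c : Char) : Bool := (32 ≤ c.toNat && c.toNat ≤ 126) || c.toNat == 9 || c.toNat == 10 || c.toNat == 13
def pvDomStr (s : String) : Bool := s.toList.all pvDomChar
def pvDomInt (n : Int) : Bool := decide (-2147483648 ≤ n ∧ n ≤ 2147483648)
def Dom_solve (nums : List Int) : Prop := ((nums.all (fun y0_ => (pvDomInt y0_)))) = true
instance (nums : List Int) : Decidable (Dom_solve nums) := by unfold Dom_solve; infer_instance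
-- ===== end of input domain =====

-- B replaces A's sort + consecutive-difference scan by an O(n) min/max + set membership check of
-- the expected terms. A sorts its argument in place in Python; the equivalence proved here is
-- about the return value only.

-- ===== PORT A =====
def solve (nums : List Int) : Bool :=
  if nums.length == 0 || nums.length == 1 then true
  else
    -- nums.sort(); difference = nums[1] - nums[0];
    -- for i in range(2, len(nums)): if nums[i] - nums[i-1] != difference: return False
    (PySem.List.pyRange 2 (nums.length : Int) 1).all
      (fun i =>
        PySem.List.pyGetD (PySem.List.sorted nums (fun x => x) false) i 0
          - PySem.List.pyGetD (PySem.List.sorted nums (fun x => x) false) (i - 1) 0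
        == PySem.List.pyGetD (PySem.List.sorted nums (fun x => x) false) 1 0
          - PySem.List.pyGetD (PySem.List.sorted nums (fun x => x) false) 0 0)

-- ===== PORT B =====
def solve_alt (nums : List Int) : Bool :=
  if (nums.length : Int) ≤ 1 then true
  else
    -- min(nums) / max(nums): length ≥ 2 here, so the options are `some`; .getD 0 totalizes
    if (PySem.List.min? nums (fun x => x)).getD 0 == (PySem.List.max? nums (fun x => x)).getD 0 then true
    else if PySem.Int.mod ((PySem.List.max? nums (fun x => x)).getD 0 - (PySem.List.min? nums (fun x => x)).getD 0) ((nums.length : Int) - 1) != 0 then false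
    else if PySem.Set.len (PySem.Set.ofList nums) != (nums.length : Int) then false
    else (PySem.List.pyRange 0 (nums.length : Int) 1).all
      (fun i => PySem.Set.contains (PySem.Set.ofList nums)
        ((PySem.List.min? nums (fun x => x)).getD 0 + i * PySem.Int.floordiv ((PySem.List.max? nums (fun x => x)).getD 0 - (PySem.List.min? nums (fun x => x)).getD 0) ((nums.length : Int) - 1)))

-- ===== PRECONDITION & SPEC =====
def Spec_solve (nums : List Int) (out : Bool) : Prop := out = solve_alt nums
instance (nums : List Int) (out : Bool) : Decidable (Spec_solve nums out) := by unfold Spec_solve; infer_instance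

-- ===== CLAIM (what is proved, stated in full; the proofs are below) =====
def Claim_equal_solve : Prop := ∀ (nums : List Int), Dom_solve nums → Spec_solve nums (solve nums)

-- ===== LEMMAS AND PROOFS =====

theorem all_pyRange_iff (a b : Int) (p : Int → Bool) :
    (PySem.List.pyRange a b 1).all p = true ↔ ∀ i : Int, a ≤ i → i < b → p i = true := by
  rw [List.all_eq_true]
  constructor
  · intro h i h1 h2
    exact h i (PySem.List.mem_pyRange_one.mpr ⟨h1, h2⟩)
  · intro h i hi
    have := PySem.List.mem_pyRange_one.mp hi
    exact h i this.1 this.2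

theorem pyGetD_toNat (xs : List Int) (i : Int) (h : 0 ≤ i) :
    PySem.List.pyGetD xs i 0 = xs.getD i.toNat 0 := by
  calc PySem.List.pyGetD xs i 0
      = PySem.List.pyGetD xs ((i.toNat : Nat) : Int) 0 := by
        rw [show ((i.toNat : Nat) : Int) = i by omega]
    _ = xs.getD i.toNat 0 := PySem.List.pyGetD_natCast xs i.toNat 0

-- characterization of A's loop for length ≥ 2 (total getD indexing)
theorem A_char (nums : List Int) (h2 : 2 ≤ nums.length) :
    solve nums = true ↔
      ∀ i : Nat, 2 ≤ i → i < nums.length →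
        (PySem.List.sorted nums (fun x => x) false).getD i 0
          - (PySem.List.sorted nums (fun x => x) false).getD (i-1) 0
        = (PySem.List.sorted nums (fun x => x) false).getD 1 0
          - (PySem.List.sorted nums (fun x => x) false).getD 0 0 := by
  unfold solve
  rw [if_neg (by simp only [Bool.or_eq_true, beq_iff_eq, not_or]; omega), all_pyRange_iff]
  constructor
  · intro h i h2i hilen
    have hh := h (i : Int) (by exact_mod_cast h2i) (by exact_mod_cast hilen)
    rw [beq_iff_eq, pyGetD_toNat _ _ (by omega), pyGetD_toNat _ _ (by omega),
        pyGetD_toNat _ _ (by omega), pyGetD_toNat _ _ (by omega)] at hh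
    convert hh using 4 <;> omega
  · intro h i h2i hib
    rw [beq_iff_eq, pyGetD_toNat _ _ (by omega), pyGetD_toNat _ _ (by omega),
        pyGetD_toNat _ _ (by omega), pyGetD_toNat _ _ (by omega)]
    have hh := h i.toNat (by omega) (by omega)
    convert hh using 4 <;> omega

-- closed form of an arithmetic list (total getD indexing)
theorem arith_closed (s : List Int) (d : Int)
    (h : ∀ i : Nat, 1 ≤ i → i < s.length → s.getD i 0 - s.getD (i-1) 0 = d) :
    ∀ i : Nat, i < s.length → s.getD i 0 = s.getD 0 0 + (i : Int) * d := by
  intro i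
  induction i with
  | zero => intro hi; simp
  | succ k ih =>
    intro hi
    have h1 := h (k+1) (by omega) hi
    have h2 := ih (by omega)
    simp only [Nat.add_sub_cancel] at h1
    push_cast
    linarith

theorem main_equiv (nums : List Int) : solve nums = solve_alt nums := by
  by_cases hn : nums.length ≤ 1
  · unfold solve solve_alt
    rw [if_pos (by simp only [Bool.or_eq_true, beq_iff_eq]; omega), if_pos (by exact_mod_cast hn)]
  · push_neg at hn
    have h2 : 2 ≤ nums.length := hn
    have hne : nums ≠ [] := by intro h; subst h; simp at h2
    obtain ⟨mn, hmin⟩ : ∃ mn, PySem.List.min? nums (fun x => x) = some mn := by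
      cases h : PySem.List.min? nums (fun x => x) with
      | none => exact absurd ((PySem.List.min?_eq_none_iff nums _).mp h) hne
      | some m => exact ⟨m, rfl⟩
    obtain ⟨mx, hmax⟩ : ∃ mx, PySem.List.max? nums (fun x => x) = some mx := by
      cases h : PySem.List.max? nums (fun x => x) with
      | none => exact absurd ((PySem.List.max?_eq_none_iff nums _).mp h) hne
      | some m => exact ⟨m, rfl⟩
    set s := PySem.List.sorted nums (fun x => x) false with hsdef
    have hslen : s.length = nums.length := PySem.List.length_sorted nums _ _
    have hperm : s.Perm nums := PySem.List.sorted_perm nums _ _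
    have hmem : ∀ x, x ∈ s ↔ x ∈ nums := fun x => hperm.mem_iff
    have hs1 : 1 < s.length := by omega
    have hgd : ∀ (k : Nat) (hk : k < s.length), s.getD k 0 = s[k] := by
      intro k hk; exact List.getD_eq_getElem s 0 hk
    have hgdm : ∀ k : Nat, k < s.length → s.getD k 0 ∈ nums := by
      intro k hk; rw [hgd k hk]; exact (hmem _).mp (List.getElem_mem _)
    have hmono : ∀ p q : Nat, p ≤ q → q < s.length → s.getD p 0 ≤ s.getD q 0 := by
      intro p q hpq hq
      rw [hgd p (by omega), hgd q hq]
      exact PySem.List.sorted_id_getElem_mono nums hpq (hsdef ▸ hq)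
    -- mn = s.getD 0 0
    have hmn : mn = s.getD 0 0 := by
      obtain ⟨a, t, hst⟩ := List.exists_cons_of_ne_nil (List.ne_nil_of_length_pos (by omega : 0 < s.length))
      have hhead := PySem.List.key_head_sorted_le nums (fun x => x) (hsdef ▸ hst) mn
        (PySem.List.min?_mem hmin)
      simp only at hhead
      have h1 := PySem.List.min?_isMin hmin _ (hgdm 0 (by omega))
      simp only at h1
      have ha : s.getD 0 0 = a := by rw [hst]; rfl
      omega
    -- mx = s.getD (len-1) 0
    have hmx : mx = s.getD (s.length - 1) 0 := by
      have h1 := PySem.List.max?_isMax hmax _ (hgdm (s.length - 1) (by omega))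
      simp only at h1
      have h2' : mx ≤ s.getD (s.length - 1) 0 := by
        obtain ⟨i, hi, hieq⟩ := List.mem_iff_getElem.mp ((hmem mx).mpr (PySem.List.max?_mem hmax))
        have := hmono i (s.length - 1) (by omega) (by omega)
        rw [hgd i hi] at this
        omega
      omega
    rw [Bool.eq_iff_iff, A_char nums h2]
    rw [← hsdef]
    unfold solve_alt
    rw [if_neg (by omega), hmin, hmax]
    simp only [Option.getD_some]
    have hn1pos : (0:Int) < (nums.length : Int) - 1 := by omega
    constructor
    · -- A → B
      intro hA
      set d := s.getD 1 0 - s.getD 0 0 with hddef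
      have harith : ∀ i : Nat, 1 ≤ i → i < s.length → s.getD i 0 - s.getD (i-1) 0 = d := by
        intro i h1i hi
        rcases Nat.lt_or_ge i 2 with hlt | hge
        · have : i = 1 := by omega
          subst this; rfl
        · exact hA i hge (by omega)
      have hcf := arith_closed s d harith
      have hd0 : 0 ≤ d := by
        have := hmono 0 1 (by omega) hs1
        omega
      have hmxmn : mx - mn = ((s.length - 1 : Nat) : Int) * d := by
        rw [hmx, hmn, hcf (s.length - 1) (by omega)]
        ring
      have hn1 : ((nums.length : Int) - 1) = ((s.length - 1 : Nat) : Int) := by omega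
      rcases eq_or_lt_of_le hd0 with hdz | hdp
      · have hmneq : mn = mx := by
          have h0 : mx - mn = 0 := by rw [hmxmn, ← hdz]; ring
          omega
        rw [if_pos (by rw [beq_iff_eq]; exact hmneq)]
      · have hmnmx : mn ≠ mx := by
          have hpos : (0:Int) < ((s.length - 1 : Nat) : Int) * d := by
            apply mul_pos _ hdp
            exact_mod_cast Nat.sub_pos_of_lt (by omega)
          omega
        rw [if_neg (by rw [beq_iff_eq]; exact hmnmx)]
        have hmodz : PySem.Int.mod (mx - mn) ((nums.length : Int) - 1) = 0 := by
          rw [PySem.Int.mod_eq_emod_of_pos hn1pos, hmxmn, hn1, Int.mul_emod_right]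
        rw [if_neg (by simp [hmodz])]
        have hdiv : PySem.Int.floordiv (mx - mn) ((nums.length : Int) - 1) = d := by
          rw [PySem.Int.floordiv_eq_ediv_of_pos hn1pos, hmxmn, hn1,
            Int.mul_ediv_cancel_left _ (by omega)]
        have hsnodup : s.Nodup := by
          rw [List.nodup_iff_getElem?_ne_getElem?]
          intro i j hij hjlen
          have h1 := hcf i (by omega)
          have hb := hcf j hjlen
          rw [hgd i (by omega)] at h1
          rw [hgd j hjlen] at hb
          have hlt : s[i]'(by omega) < s[j] := by
            have : (i:Int) * d < (j:Int) * d := by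
              apply mul_lt_mul_of_pos_right _ hdp
              exact_mod_cast hij
            omega
          rw [List.getElem?_eq_getElem (by omega), List.getElem?_eq_getElem hjlen]
          simp only [ne_eq, Option.some.injEq]
          omega
        have hnodup : nums.Nodup := hperm.nodup_iff.mp hsnodup
        have hseenperm : (PySem.Set.ofList nums).Perm nums := by
          rw [List.perm_ext_iff_of_nodup (PySem.Set.nodup_ofList nums) hnodup]
          intro a; exact PySem.Set.mem_ofList nums a
        have hseenlenN : (PySem.Set.ofList nums).length = nums.length := hseenperm.length_eq
        rw [if_neg (by simp [PySem.Set.len, hseenlenN])]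
        rw [all_pyRange_iff]
        intro i h0i hilen
        rw [hdiv, PySem.Set.contains_eq_decide]
        simp only [decide_eq_true_eq]
        rw [PySem.Set.mem_ofList]
        have hiN : i.toNat < s.length := by omega
        have heq : mn + i * d = s.getD i.toNat 0 := by
          rw [hcf i.toNat hiN, hmn]
          have : ((i.toNat : Nat) : Int) = i := by omega
          rw [this]
        rw [heq]
        exact hgdm i.toNat hiN
    · -- B → A
      intro hB
      by_cases hmnmx : mn = mx
      · have hall : ∀ i : Nat, i < s.length → s.getD i 0 = mn := by
          intro i hi
          have hm : s.getD i 0 ∈ nums := hgdm i hi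
          have h1 := PySem.List.min?_isMin hmin _ hm
          have hb := PySem.List.max?_isMax hmax _ hm
          simp only at h1 hb
          omega
        intro i h2i hilen
        rw [hall i (by omega), hall (i-1) (by omega), hall 1 hs1, hall 0 (by omega)]
      · rw [if_neg (by rw [beq_iff_eq]; exact hmnmx)] at hB
        by_cases hmod : PySem.Int.mod (mx - mn) ((nums.length : Int) - 1) = 0
        case neg => rw [if_pos (by simp [hmod])] at hB; exact absurd hB (by simp)
        rw [if_neg (by simp [hmod])] at hB
        set d := PySem.Int.floordiv (mx - mn) ((nums.length : Int) - 1) with hddef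
        have hmxmn : mx - mn = ((nums.length : Int) - 1) * d := by
          have h := PySem.Int.floordiv_mul_add_mod (mx - mn) ((nums.length : Int) - 1)
          rw [hmod, add_zero, ← hddef, mul_comm] at h
          exact h.symm
        have hmnlt : mn < mx := by
          have h1 := PySem.List.min?_isMin hmin _ (PySem.List.max?_mem hmax)
          simp only at h1
          omega
        have hdp : 0 < d := by
          by_cases h : d ≤ 0
          · exfalso
            have : ((nums.length : Int) - 1) * d ≤ 0 := mul_nonpos_of_nonneg_of_nonpos (by omega) h
            omega
          · omega
        by_cases hlen : (PySem.Set.ofList nums).length = nums.length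
        case neg => rw [if_pos (by simp [PySem.Set.len, hlen])] at hB; exact absurd hB (by simp)
        rw [if_neg (by simp [PySem.Set.len, hlen]), all_pyRange_iff] at hB
        have hmemB : ∀ i : Int, 0 ≤ i → i < (nums.length : Int) → mn + i * d ∈ nums := by
          intro i h0 h1
          have hc := hB i h0 h1
          rw [PySem.Set.contains_eq_decide] at hc
          simp only [decide_eq_true_eq] at hc
          exact (PySem.Set.mem_ofList nums _).mp hc
        have hsub : PySem.Set.ofList nums ⊆ nums := fun a ha => (PySem.Set.mem_ofList nums a).mp ha
        have hseenperm : (PySem.Set.ofList nums).Perm nums :=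
          ((PySem.Set.nodup_ofList nums).subperm hsub).perm_of_length_le (by omega)
        have hnodup : nums.Nodup := hseenperm.nodup_iff.mp (PySem.Set.nodup_ofList nums)
        set L := (PySem.List.pyRange 0 (nums.length : Int) 1).map (fun i => mn + i * d) with hLdef
        have hLlen : L.length = nums.length := by
          rw [hLdef, List.length_map, PySem.List.length_pyRange_one]
          omega
        have hLpw : L.Pairwise (fun a b => a < b) := by
          rw [hLdef]
          apply List.Pairwise.map
          · intro a b hab
            have : a * d < b * d := mul_lt_mul_of_pos_right hab hdp
            omega
          · simpa using PySem.List.pairwise_lt_pyRange_one 0 (nums.length : Int)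
        have hLsub : L ⊆ nums := by
          intro a ha
          rw [hLdef, List.mem_map] at ha
          obtain ⟨i, hi, hieq⟩ := ha
          rw [PySem.List.mem_pyRange_one] at hi
          rw [← hieq]
          exact hmemB i hi.1 hi.2
        have hLnodup : L.Nodup := hLpw.imp (fun h => ne_of_lt h)
        have hLperm : L.Perm nums := (hLnodup.subperm hLsub).perm_of_length_le (by omega)
        have hsL : s = L := hsdef.trans (PySem.List.sorted_eq_of_perm_of_pairwise_lt nums L (fun x => x) hLperm hLpw)
        have hgetL : ∀ k : Nat, k < L.length → L.getD k 0 = mn + (k : Int) * d := by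
          intro k hk
          rw [List.getD_eq_getElem L 0 hk]
          simp only [hLdef, List.getElem_map, PySem.List.getElem_pyRange_one]
          ring
        intro i h2i hilen
        rw [hsL, hgetL i (by omega), hgetL (i-1) (by omega), hgetL 1 (by omega), hgetL 0 (by omega)]
        push_cast [Nat.cast_sub (by omega : 1 ≤ i)]
        ring

-- ===== VERDICT (by name: the statement is the Claim_ definition above) =====
theorem solve_spec : Claim_equal_solve := by
  intro nums _
  unfold Spec_solve
  exact main_equiv nums
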